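-- pv_equiv track=rewrite | github.com/alriyadsouza/Aiden | train.py | get_speciality
-- ===== SOURCE A (Python) =====
-- def get_speciality(selected_disease):
--   disease_specialty_map = {
--   "Cardiologist": ["Coronary artery disease", "Arrhythmia"],
--   "Dermatologist": ["Acne", "Eczema"],
--   "Orthopedic Surgeon": ["Fractures", "Osteoarthritis"],
--   "Gynecologist": ["Polycystic ovary syndrome (PCOS)", "Endometriosis"],
--   "Neurologist": ["Migraine", "Multiple sclerosis"],
--   "Psychiatrist": ["Depression", "Anxiety disorders"],
--   "Oncologist": ["Chemotherapy", "Radiation therapy"],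
--   "Gastroenterologist": ["Irritable bowel syndrome (IBS)", "Gastroesophageal reflux disease (GERD)"],
--   "Pediatrician": ["Childhood vaccinations", "Asthma in children"],
--   "Ophthalmologist": ["Cataracts", "Glaucoma"]
--   }
--   for specialty, diseases in disease_specialty_map.items():
--       if selected_disease in diseases:
--           return specialty
--   return None
-- ===== SOURCE B (Python) =====
-- _DISEASE_TO_SPECIALTY = {
--     "Coronary artery disease": "Cardiologist",
--     "Arrhythmia": "Cardiologist",
--     "Acne": "Dermatologist",
--     "Eczema": "Dermatologist",
--     "Fractures": "Orthopedic Surgeon",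
--     "Osteoarthritis": "Orthopedic Surgeon",
--     "Polycystic ovary syndrome (PCOS)": "Gynecologist",
--     "Endometriosis": "Gynecologist",
--     "Migraine": "Neurologist",
--     "Multiple sclerosis": "Neurologist",
--     "Depression": "Psychiatrist",
--     "Anxiety disorders": "Psychiatrist",
--     "Chemotherapy": "Oncologist",
--     "Radiation therapy": "Oncologist",
--     "Irritable bowel syndrome (IBS)": "Gastroenterologist",
--     "Gastroesophageal reflux disease (GERD)": "Gastroenterologist",
--     "Childhood vaccinations": "Pediatrician",
--     "Asthma in children": "Pediatrician",
--     "Cataracts": "Ophthalmologist",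
--     "Glaucoma": "Ophthalmologist",
-- }
--
-- def get_speciality(selected_disease):
--     return _DISEASE_TO_SPECIALTY.get(selected_disease)
-- ===== Notes on version B (the rewrite author's own statement) =====
-- stated objective: simpler
-- what changed: Replaces the per-specialty scan with a membership test on each disease list by a single precomputed inverted disease-to-specialty dict and one direct .get lookup, eliminating the loop.
import Mathlib
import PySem

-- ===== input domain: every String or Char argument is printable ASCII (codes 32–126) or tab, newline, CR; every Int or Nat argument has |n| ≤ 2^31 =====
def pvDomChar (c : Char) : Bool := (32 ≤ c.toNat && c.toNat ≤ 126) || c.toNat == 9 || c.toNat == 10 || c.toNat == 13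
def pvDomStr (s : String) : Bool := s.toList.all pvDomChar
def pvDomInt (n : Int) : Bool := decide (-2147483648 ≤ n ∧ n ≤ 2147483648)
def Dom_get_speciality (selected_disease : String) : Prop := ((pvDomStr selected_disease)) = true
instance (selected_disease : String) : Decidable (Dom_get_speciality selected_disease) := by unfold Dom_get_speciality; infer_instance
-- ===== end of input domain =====

-- B replaces A's per-specialty scan with one precomputed inverted disease→specialty table and a single lookup (simpler, no loop over specialties).


-- ===== PORT A =====
def pvSpecMapA : List (String × List String) :=
  [("Cardiologist", ["Coronary artery disease", "Arrhythmia"]),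
   ("Dermatologist", ["Acne", "Eczema"]),
   ("Orthopedic Surgeon", ["Fractures", "Osteoarthritis"]),
   ("Gynecologist", ["Polycystic ovary syndrome (PCOS)", "Endometriosis"]),
   ("Neurologist", ["Migraine", "Multiple sclerosis"]),
   ("Psychiatrist", ["Depression", "Anxiety disorders"]),
   ("Oncologist", ["Chemotherapy", "Radiation therapy"]),
   ("Gastroenterologist", ["Irritable bowel syndrome (IBS)", "Gastroesophageal reflux disease (GERD)"]),
   ("Pediatrician", ["Childhood vaccinations", "Asthma in children"]),
   ("Ophthalmologist", ["Cataracts", "Glaucoma"])]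

-- the for-loop with early return: first specialty whose disease list contains the input
def pvLoopA (s : String) : List (String × List String) → Option String
  | [] => none
  | (sp, ds) :: rest => if ds.contains s then some sp else pvLoopA s rest

def get_speciality (selected_disease : String) : Option String :=
  pvLoopA selected_disease pvSpecMapA

-- ===== PORT B =====
-- B: precomputed inverted table, single dict lookup (no loop over specialties)
def pvDiseaseToSpecialty : PySem.Dict String String :=
  PySem.Dict.ofList
  [("Coronary artery disease", "Cardiologist"),
   ("Arrhythmia", "Cardiologist"),
   ("Acne", "Dermatologist"),
   ("Eczema", "Dermatologist"),
   ("Fractures", "Orthopedic Surgeon"),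
   ("Osteoarthritis", "Orthopedic Surgeon"),
   ("Polycystic ovary syndrome (PCOS)", "Gynecologist"),
   ("Endometriosis", "Gynecologist"),
   ("Migraine", "Neurologist"),
   ("Multiple sclerosis", "Neurologist"),
   ("Depression", "Psychiatrist"),
   ("Anxiety disorders", "Psychiatrist"),
   ("Chemotherapy", "Oncologist"),
   ("Radiation therapy", "Oncologist"),
   ("Irritable bowel syndrome (IBS)", "Gastroenterologist"),
   ("Gastroesophageal reflux disease (GERD)", "Gastroenterologist"),
   ("Childhood vaccinations", "Pediatrician"),
   ("Asthma in children", "Pediatrician"),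
   ("Cataracts", "Ophthalmologist"),
   ("Glaucoma", "Ophthalmologist")]

def get_speciality_alt (selected_disease : String) : Option String :=
  PySem.Dict.get? pvDiseaseToSpecialty selected_disease

-- ===== PRECONDITION & SPEC =====
def Spec_get_speciality (selected_disease : String) (out : Option String) : Prop := out = get_speciality_alt selected_disease
instance (selected_disease : String) (out : Option String) : Decidable (Spec_get_speciality selected_disease out) := by unfold Spec_get_speciality; infer_instance

-- ===== CLAIM (what is proved, stated in full; the proofs are below) =====
def Claim_equal_get_speciality : Prop := ∀ (selected_disease : String), Dom_get_speciality selected_disease → Spec_get_speciality selected_disease (get_speciality selected_disease)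

-- ===== LEMMAS AND PROOFS =====

-- ===== VERDICT (by name: the statement is the Claim_ definition above) =====
theorem get_speciality_spec : Claim_equal_get_speciality := by
  intro s _
  unfold Spec_get_speciality
  by_cases h1 : s = "Coronary artery disease"; · subst h1; decide
  by_cases h2 : s = "Arrhythmia"; · subst h2; decide
  by_cases h3 : s = "Acne"; · subst h3; decide
  by_cases h4 : s = "Eczema"; · subst h4; decide
  by_cases h5 : s = "Fractures"; · subst h5; decide
  by_cases h6 : s = "Osteoarthritis"; · subst h6; decide
  by_cases h7 : s = "Polycystic ovary syndrome (PCOS)"; · subst h7; decide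
  by_cases h8 : s = "Endometriosis"; · subst h8; decide
  by_cases h9 : s = "Migraine"; · subst h9; decide
  by_cases h10 : s = "Multiple sclerosis"; · subst h10; decide
  by_cases h11 : s = "Depression"; · subst h11; decide
  by_cases h12 : s = "Anxiety disorders"; · subst h12; decide
  by_cases h13 : s = "Chemotherapy"; · subst h13; decide
  by_cases h14 : s = "Radiation therapy"; · subst h14; decide
  by_cases h15 : s = "Irritable bowel syndrome (IBS)"; · subst h15; decide
  by_cases h16 : s = "Gastroesophageal reflux disease (GERD)"; · subst h16; decide
  by_cases h17 : s = "Childhood vaccinations"; · subst h17; decide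
  by_cases h18 : s = "Asthma in children"; · subst h18; decide
  by_cases h19 : s = "Cataracts"; · subst h19; decide
  by_cases h20 : s = "Glaucoma"; · subst h20; decide
  have hd : pvDiseaseToSpecialty = PySem.Dict.mk
      [("Coronary artery disease", "Cardiologist"),
       ("Arrhythmia", "Cardiologist"),
       ("Acne", "Dermatologist"),
       ("Eczema", "Dermatologist"),
       ("Fractures", "Orthopedic Surgeon"),
       ("Osteoarthritis", "Orthopedic Surgeon"),
       ("Polycystic ovary syndrome (PCOS)", "Gynecologist"),
       ("Endometriosis", "Gynecologist"),
       ("Migraine", "Neurologist"),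
       ("Multiple sclerosis", "Neurologist"),
       ("Depression", "Psychiatrist"),
       ("Anxiety disorders", "Psychiatrist"),
       ("Chemotherapy", "Oncologist"),
       ("Radiation therapy", "Oncologist"),
       ("Irritable bowel syndrome (IBS)", "Gastroenterologist"),
       ("Gastroesophageal reflux disease (GERD)", "Gastroenterologist"),
       ("Childhood vaccinations", "Pediatrician"),
       ("Asthma in children", "Pediatrician"),
       ("Cataracts", "Ophthalmologist"),
       ("Glaucoma", "Ophthalmologist")] := by decide
  simp [get_speciality, pvLoopA, pvSpecMapA, get_speciality_alt, hd,
        PySem.Dict.get?_mk_cons, h1, h2, h3, h4, h5, h6, h7, h8, h9, h10,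
        h11, h12, h13, h14, h15, h16, h17, h18, h19, h20,
        Ne.symm h1, Ne.symm h2, Ne.symm h3, Ne.symm h4, Ne.symm h5, Ne.symm h6, Ne.symm h7,
        Ne.symm h8, Ne.symm h9, Ne.symm h10, Ne.symm h11, Ne.symm h12, Ne.symm h13, Ne.symm h14,
        Ne.symm h15, Ne.symm h16, Ne.symm h17, Ne.symm h18, Ne.symm h19, Ne.symm h20,
        PySem.Dict.get?]
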